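-- pv_equiv track=rewrite | github.com/leonsolon/coding-challenges | hackerrank/1-month-preparation-kit/week4/qheap1/guilherme.py | qheap1
-- ===== SOURCE A (Python) =====
-- import heapq
--
-- def qheap1(queries):
--     heap = []
--     result = []
--     need_heapfy = False
--     for i, q in enumerate(queries):
--         if q[0] == '1':
--             heapq.heappush(heap, int(q[1]))
--         elif q[0] == '2':
--             heap.remove(int(q[1]))
--             need_heapfy = True
--         elif q[0] == '3':
--             if need_heapfy:
--                 heapq.heapify(heap)
--                 need_heapfy = False
--             result.append(str(heap[0]))
--     return result
-- ===== SOURCE B (Python) =====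
-- def qheap1(queries):
--     xs = []
--     result = []
--     for q in queries:
--         if q[0] == '1':
--             xs.append(int(q[1]))
--         elif q[0] == '2':
--             xs.remove(int(q[1]))
--         elif q[0] == '3':
--             result.append(str(min(xs)))
--     return result
-- ===== Notes on version B (the rewrite author's own statement) =====
-- stated objective: simpler
-- what changed: Replaced the binary heap with lazy re-heapify (heappush/remove/heapify/peek) by a plain list with append/remove and a linear min() scan at each type-3 query; no heap structure or need_heapfy flag at all.
import Mathlib
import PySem

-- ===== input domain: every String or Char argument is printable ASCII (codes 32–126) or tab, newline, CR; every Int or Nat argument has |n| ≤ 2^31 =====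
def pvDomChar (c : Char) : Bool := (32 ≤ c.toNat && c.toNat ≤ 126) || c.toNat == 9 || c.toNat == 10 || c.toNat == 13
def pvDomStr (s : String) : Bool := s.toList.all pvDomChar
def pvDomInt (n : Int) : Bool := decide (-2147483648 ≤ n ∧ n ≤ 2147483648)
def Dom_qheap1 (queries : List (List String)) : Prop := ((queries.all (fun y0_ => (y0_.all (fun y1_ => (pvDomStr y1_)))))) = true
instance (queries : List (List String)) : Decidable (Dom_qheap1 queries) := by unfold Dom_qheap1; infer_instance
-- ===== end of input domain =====

-- B replaces A's binary heap with lazy re-heapify by a plain list with a linear min() scan per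
-- type-3 query (objective: simpler; no measured speed claim).

-- ===== PORT A =====
-- CPython heapq._siftdown(heap, startpos, pos): newitem is passed explicitly
-- (at the call sites heap[pos] is about to be overwritten, so this is exact).
-- (CPython's locals parentpos/parent are inlined)
def pvSiftdown (heap : List Int) (startpos pos : Nat) (newitem : Int) : List Int :=
  if _h : startpos < pos then
    if newitem < heap.getD ((pos - 1) / 2) 0 then
      pvSiftdown (heap.set pos (heap.getD ((pos - 1) / 2) 0)) startpos ((pos - 1) / 2) newitem
    else heap.set pos newitem
  else heap.set pos newitem
termination_by pos
decreasing_by omega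

-- heapq.heappush: append, then sift the new item up from the last position
def pvHeappush (heap : List Int) (item : Int) : List Int :=
  pvSiftdown (heap ++ [item]) 0 heap.length item

-- the childpos selection of heapq._siftup: the right child if it exists and is not larger
def pvChild (heap : List Int) (pos : Nat) : Nat :=
  if (2 * pos + 1) + 1 < heap.length && !(heap.getD (2 * pos + 1) 0 < heap.getD ((2 * pos + 1) + 1) 0)
  then (2 * pos + 1) + 1 else 2 * pos + 1

-- the while-loop of heapq._siftup: move the hole at pos down to a leaf, following smaller children
def pvSiftupLoop (heap : List Int) (pos : Nat) : List Int × Nat :=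
  if _h : 2 * pos + 1 < heap.length then
    pvSiftupLoop (heap.set pos (heap.getD (pvChild heap pos) 0)) (pvChild heap pos)
  else (heap, pos)
termination_by heap.length - pos
decreasing_by simp only [List.length_set, pvChild]; split <;> omega

-- heapq._siftup(heap, pos)
def pvSiftup (heap : List Int) (pos : Nat) : List Int :=
  let newitem := heap.getD pos 0
  let r := pvSiftupLoop heap pos
  pvSiftdown r.1 pos r.2 newitem

-- heapq.heapify: for i in reversed(range(n//2)): _siftup(x, i)
def pvHeapify (heap : List Int) : List Int :=
  ((List.range (heap.length / 2)).reverse).foldl (fun a i => pvSiftup a i) heap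

-- the for-loop of A; none = the Python raises (IndexError/ValueError)
def qheap1Go : List (List String) → List Int → List String → Bool → Option (List String)
  | [], _, result, _ => some result
  | q :: rest, heap, result, needH =>
    match PySem.List.pyGet? q 0 with
    | none => none
    | some c =>
      if c = "1" then
        match PySem.List.pyGet? q 1 with
        | none => none
        | some s =>
          match PySem.Int.ofStr? s with
          | none => none
          | some v => qheap1Go rest (pvHeappush heap v) result needH
      else if c = "2" then
        match PySem.List.pyGet? q 1 with
        | none => none
        | some s =>
          match PySem.Int.ofStr? s with
          | none => none
          | some v =>
            match PySem.List.remove? heap v with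
            | none => none
            | some heap' => qheap1Go rest heap' result true
      else if c = "3" then
        match PySem.List.pyGet? (if needH then pvHeapify heap else heap) 0 with
        | none => none
        | some m =>
          qheap1Go rest (if needH then pvHeapify heap else heap)
            (result ++ [PySem.Int.toStr m]) false
      else qheap1Go rest heap result needH

def qheap1 (queries : List (List String)) : List String :=
  (qheap1Go queries [] [] false).getD []

-- ===== PORT B =====
-- the for-loop of B: a plain list, min() scan on query 3
def qheap1AltGo : List (List String) → List Int → List String → Option (List String)
  | [], _, result => some result
  | q :: rest, xs, result =>
    match PySem.List.pyGet? q 0 with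
    | none => none
    | some c =>
      if c = "1" then
        match PySem.List.pyGet? q 1 with
        | none => none
        | some s =>
          match PySem.Int.ofStr? s with
          | none => none
          | some v => qheap1AltGo rest (xs ++ [v]) result
      else if c = "2" then
        match PySem.List.pyGet? q 1 with
        | none => none
        | some s =>
          match PySem.Int.ofStr? s with
          | none => none
          | some v =>
            match PySem.List.remove? xs v with
            | none => none
            | some xs' => qheap1AltGo rest xs' result
      else if c = "3" then
        match PySem.List.min? xs (fun x => x) with
        | none => none
        | some m => qheap1AltGo rest xs (result ++ [PySem.Int.toStr m])
      else qheap1AltGo rest xs result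

def qheap1_alt (queries : List (List String)) : List String :=
  (qheap1AltGo queries [] []).getD []

-- ===== PRECONDITION & SPEC =====
-- int(q[1]) of a query, if it exists and parses
def pvArg (q : List String) : Option Int := q[1]?.bind PySem.Int.ofStr?

-- how many copies of value v a prefix of queries has inserted minus removed
def pvBalance (pref : List (List String)) (v : Int) : Int :=
  (pref.countP (fun q => q.head? == some "1" && pvArg q == some v) : Int)
  - (pref.countP (fun q => q.head? == some "2" && pvArg q == some v) : Int)

-- net number of elements a prefix of queries leaves in the container
def pvSize (pref : List (List String)) : Int :=
  (pref.countP (fun q => q.head? == some "1") : Int)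
  - (pref.countP (fun q => q.head? == some "2") : Int)

-- one query is safe after a given prefix: nonempty, argument parses, '2' removes a
-- present value, '3' reads a nonempty heap
def pvPreQ (pref : List (List String)) (q : List String) : Bool :=
  match q.head? with
  | none => false
  | some c =>
    if c = "1" then (pvArg q).isSome
    else if c = "2" then
      match pvArg q with
      | some v => decide (1 ≤ pvBalance pref v)
      | none => false
    else if c = "3" then decide (1 ≤ pvSize pref)
    else true

-- exactly the inputs on which the Python A returns (raises no IndexError/ValueError)
def Pre_qheap1 (queries : List (List String)) : Prop :=
  ∀ i ∈ List.range queries.length, pvPreQ (queries.take i) (queries.getD i []) = true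
instance (queries : List (List String)) : Decidable (Pre_qheap1 queries) := by
  unfold Pre_qheap1; infer_instance

def pvWitness_qheap1 : List (List String) :=
  [["1", "5"], ["1", " 4 "], ["3"], ["2", "+4"], ["3"], ["1", "3"], ["3"]]

def Spec_qheap1 (queries : List (List String)) (out : List String) : Prop := out = qheap1_alt queries
instance (queries : List (List String)) (out : List String) : Decidable (Spec_qheap1 queries out) := by unfold Spec_qheap1; infer_instance

-- ===== CLAIM (what is proved, stated in full; the proofs are below) =====
def Claim_equal_qheap1 : Prop := ∀ (queries : List (List String)), Dom_qheap1 queries → Pre_qheap1 queries → Spec_qheap1 queries (qheap1 queries)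

-- ===== LEMMAS AND PROOFS =====

-- getD through set, in one formula
theorem pv_getD_set (h : List Int) (i j : Nat) (a : Int) :
    (h.set i a).getD j 0 = if i = j ∧ j < h.length then a else h.getD j 0 := by
  simp only [List.getD, List.getElem?_set]
  split_ifs with h1 h2 h3 <;> simp_all

theorem pv_count_set (h : List Int) (i : Nat) (a b : Int) (hi : i < h.length) :
    (h.set i a).count b
      = h.count b - (if h.getD i 0 = b then 1 else 0) + (if a = b then 1 else 0) := by
  induction h generalizing i with
  | nil => simp at hi
  | cons x t ih =>
    cases i with
    | zero =>
      simp only [List.set_cons_zero, List.count_cons, List.getD_cons_zero]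
      simp only [beq_iff_eq]
      split_ifs <;> omega
    | succ n =>
      have hn : n < t.length := by simpa using hi
      simp only [List.set_cons_succ, List.count_cons, List.getD_cons_succ]
      rw [ih n hn]
      have hmem : (if t.getD n 0 = b then 1 else 0) ≤ t.count b := by
        split_ifs with he
        · have : b ∈ t := by rw [← he, List.getD_eq_getElem t 0 hn]; exact List.getElem_mem hn
          simpa using List.count_pos_iff.mpr this
        · omega
      simp only [beq_iff_eq] at hmem ⊢
      split_ifs at hmem ⊢ <;> omega

-- membership count of a position's value
theorem pv_getD_count (h : List Int) (k : Nat) (b : Int) (hk : k < h.length)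
    (he : h.getD k 0 = b) : 1 ≤ h.count b := by
  have : b ∈ h := by rw [← he, List.getD_eq_getElem h 0 hk]; exact List.getElem_mem hk
  simpa using List.count_pos_iff.mpr this

-- swapping two positions is a permutation
theorem pv_swap_perm (h : List Int) (i j : Nat) (x : Int)
    (hi : i < h.length) (hj : j < h.length) (hne : i ≠ j) :
    ((h.set i (h.getD j 0)).set j x).Perm (h.set i x) := by
  rw [List.perm_iff_count]
  intro b
  have hlen : (h.set i (h.getD j 0)).length = h.length := by simp
  rw [pv_count_set _ j x b (by omega), pv_count_set h i (h.getD j 0) b hi,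
      pv_count_set h i x b hi, pv_getD_set]
  have h1 : (if h.getD i 0 = b then 1 else 0) ≤ h.count b := by
    split_ifs with he
    · exact pv_getD_count h i b hi he
    · omega
  simp only [hne, false_and, if_false]
  split_ifs at h1 ⊢ <;> omega

-- sifting is a permutation of writing newitem at pos
theorem pv_siftdown_perm (pos : Nat) (heap : List Int) (s : Nat) (v : Int)
    (hp : pos < heap.length) :
    (pvSiftdown heap s pos v).Perm (heap.set pos v) := by
  induction pos using Nat.strong_induction_on generalizing heap with
  | _ pos ih =>
    rw [pvSiftdown]
    split
    · next h1 =>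
      split
      · next h2 =>
        have hrec := ih ((pos - 1) / 2) (by omega) (heap.set pos (heap.getD ((pos - 1) / 2) 0))
          (by simp; omega)
        exact hrec.trans (pv_swap_perm heap pos ((pos - 1) / 2) v hp (by omega) (by omega))
      · exact List.Perm.refl _
    · exact List.Perm.refl _

-- "s is an ancestor of p" in heap index coding
def pvDesc (s p : Nat) : Bool :=
  if s < p then pvDesc s ((p - 1) / 2) else p == s
termination_by p
decreasing_by omega

theorem pvDesc_le {s p : Nat} (h : pvDesc s p = true) : s ≤ p := by
  rw [pvDesc] at h
  split at h
  · omega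
  · simp at h; omega

theorem pvDesc_step {s p : Nat} (h : pvDesc s p = true) (hlt : s < p) :
    pvDesc s ((p - 1) / 2) = true := by
  rw [pvDesc] at h; simpa [hlt] using h

theorem pvDesc_zero (p : Nat) : pvDesc 0 p = true := by
  induction p using Nat.strong_induction_on with
  | _ p ih =>
    rw [pvDesc]
    split
    · exact ih ((p - 1) / 2) (by omega)
    · simp; omega

theorem pvDesc_self (s : Nat) : pvDesc s s = true := by
  unfold pvDesc; simp

-- heap order among all edges whose parent index is ≥ s
def IsHeapFrom (h : List Int) (s : Nat) : Prop :=
  ∀ j, 0 < j → j < h.length → s ≤ (j - 1) / 2 →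
    h.getD ((j - 1) / 2) 0 ≤ h.getD j 0

theorem pv_gset_ne (h : List Int) {i j : Nat} (a : Int) (hij : i ≠ j) :
    (h.set i a).getD j 0 = h.getD j 0 := by
  rw [pv_getD_set]; simp [hij]

theorem pv_gset_self (h : List Int) {i : Nat} (a : Int) (hi : i < h.length) :
    (h.set i a).getD i 0 = a := by
  rw [pv_getD_set]; simp [hi]

theorem pv_siftdown_heap (s : Nat) (v : Int) : ∀ (pos : Nat) (heap : List Int),
    pvDesc s pos = true → pos < heap.length →
    (∀ j, 0 < j → j < heap.length → s ≤ (j - 1) / 2 → j ≠ pos →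
      (heap.set pos v).getD ((j - 1) / 2) 0 ≤ (heap.set pos v).getD j 0) →
    (s < pos → ∀ c, c < heap.length → (c - 1) / 2 = pos →
      heap.getD ((pos - 1) / 2) 0 ≤ heap.getD c 0) →
    IsHeapFrom (pvSiftdown heap s pos v) s := by
  intro pos
  induction pos using Nat.strong_induction_on with
  | _ pos ih =>
    intro heap hdesc hp hi hii
    rw [pvSiftdown]
    split
    · next h1 =>
      split
      · next h2 =>
        -- v < parent: swap and recurse at parentpos
        apply ih ((pos - 1) / 2) (by omega) _ (pvDesc_step hdesc h1) (by simp; omega)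
        · -- heap-except-at-parentpos for the swapped array
          intro j hj0 hjl hjs hjne
          simp only [List.length_set] at hjl
          by_cases hjp : j = pos
          · subst hjp
            rw [pv_gset_self _ v (by simp; omega), pv_gset_ne _ v (by omega),
                pv_gset_self _ _ hp]
            exact le_of_lt h2
          · by_cases hpj : (j - 1) / 2 = pos
            · rw [pv_gset_ne _ v (by omega), hpj, pv_gset_self _ _ hp,
                  pv_gset_ne _ v (by omega), pv_gset_ne _ _ (by omega)]
              exact hii h1 j hjl hpj
            · by_cases hpp : (j - 1) / 2 = (pos - 1) / 2
              · rw [hpp, pv_gset_self _ v (by simp; omega), pv_gset_ne _ v (by omega),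
                    pv_gset_ne _ _ (by omega)]
                have := hi j hj0 hjl (by omega) hjp
                rw [pv_gset_ne _ v (by omega), pv_gset_ne _ v (by omega), hpp] at this
                omega
              · rw [pv_gset_ne _ v (by omega), pv_gset_ne _ v (by omega),
                    pv_gset_ne _ _ (by omega), pv_gset_ne _ _ (by omega)]
                have := hi j hj0 hjl (by omega) hjp
                rw [pv_gset_ne _ v (by omega), pv_gset_ne _ v (by omega)] at this
                exact this
        · -- the hole's parent is at most the hole's children
          intro hsp c hcl hcp
          simp only [List.length_set] at hcl
          have hppp : s ≤ ((pos - 1) / 2 - 1) / 2 :=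
            pvDesc_le (pvDesc_step (pvDesc_step hdesc h1) hsp)
          have hstep1 : heap.getD (((pos - 1) / 2 - 1) / 2) 0 ≤ heap.getD ((pos - 1) / 2) 0 := by
            have := hi ((pos - 1) / 2) (by omega) (by omega) hppp (by omega)
            rwa [pv_gset_ne _ v (by omega), pv_gset_ne _ v (by omega)] at this
          by_cases hcpos : c = pos
          · subst hcpos
            rw [pv_gset_ne _ _ (by omega), pv_gset_self _ _ hp]
            exact hstep1
          · rw [pv_gset_ne _ _ (by omega), pv_gset_ne _ _ (by omega)]
            have hstep2 : heap.getD ((pos - 1) / 2) 0 ≤ heap.getD c 0 := by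
              have := hi c (by omega) hcl (by omega) hcpos
              rwa [pv_gset_ne _ v (by omega), pv_gset_ne _ v (by omega), hcp] at this
            omega
      · next h2 =>
        -- parent ≤ v: stop here
        intro j hj0 hjl hjs
        simp only [List.length_set] at hjl
        by_cases hjp : j = pos
        · subst hjp
          rw [pv_gset_ne _ v (by omega), pv_gset_self _ v hp]
          omega
        · exact hi j hj0 hjl hjs hjp
    · next h1 =>
      -- pos = s: the array with v written is already in order among parents ≥ s
      have hps : pos = s := by
        rw [pvDesc] at hdesc; simp [h1] at hdesc; omega
      intro j hj0 hjl hjs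
      simp only [List.length_set] at hjl
      by_cases hjp : j = pos
      · omega
      · exact hi j hj0 hjl hjs hjp

theorem pv_set_append_last (heap : List Int) (v w : Int) :
    (heap ++ [v]).set heap.length w = heap ++ [w] := by
  rw [List.set_append_right _ _ (le_refl _)]
  simp

theorem pv_push_perm (heap : List Int) (v : Int) :
    (pvHeappush heap v).Perm (heap ++ [v]) := by
  unfold pvHeappush
  have := pv_siftdown_perm heap.length (heap ++ [v]) 0 v (by simp)
  rwa [pv_set_append_last] at this

theorem pv_getD_append (heap : List Int) (v : Int) (k : Nat) (hk : k < heap.length) :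
    (heap ++ [v]).getD k 0 = heap.getD k 0 := by
  simp [List.getD, List.getElem?_append_left hk]

theorem pv_push_heap (heap : List Int) (v : Int) (h : IsHeapFrom heap 0) :
    IsHeapFrom (pvHeappush heap v) 0 := by
  unfold pvHeappush
  apply pv_siftdown_heap 0 v heap.length (heap ++ [v]) (pvDesc_zero _) (by simp)
  · intro j hj0 hjl hjs hjne
    simp only [List.length_append, List.length_cons, List.length_nil] at hjl
    rw [pv_set_append_last, pv_getD_append _ _ _ (by omega), pv_getD_append _ _ _ (by omega)]
    exact h j hj0 (by omega) (by omega)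
  · intro h0 c hcl hcp
    simp only [List.length_append, List.length_cons, List.length_nil] at hcl
    omega

theorem pv_child_spec (b : List Int) (p : Nat) (h : 2 * p + 1 < b.length) :
    p < pvChild b p ∧ pvChild b p < b.length ∧ (pvChild b p - 1) / 2 = p ∧
    (∀ s', s' ≠ p → (s' - 1) / 2 = p → s' < b.length →
      b.getD (pvChild b p) 0 ≤ b.getD s' 0) := by
  unfold pvChild
  split
  · next hcond =>
    rw [Bool.and_eq_true, decide_eq_true_eq, Bool.not_eq_true', decide_eq_false_iff_not,
      not_lt] at hcond
    refine ⟨by omega, by omega, by omega, ?_⟩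
    intro s' hsp hs' hsl
    have hcase : s' = 2 * p + 1 ∨ s' = 2 * p + 1 + 1 := by omega
    rcases hcase with h' | h' <;> subst h'
    · exact hcond.2
    · exact le_refl _
  · next hcond =>
    rw [Bool.and_eq_true, not_and_or, decide_eq_true_eq, not_lt,
      Bool.not_eq_true', Bool.not_eq_false, decide_eq_true_eq] at hcond
    refine ⟨by omega, by omega, by omega, ?_⟩
    intro s' hsp hs' hsl
    have hcase : s' = 2 * p + 1 ∨ s' = 2 * p + 1 + 1 := by omega
    rcases hcase with h' | h' <;> subst h'
    · exact le_refl _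
    · rcases hcond with h'' | h''
      · omega
      · exact le_of_lt h''

theorem pv_siftupLoop_spec (i : Nat) (b : List Int) (p : Nat) :
    pvDesc i p = true → p < b.length →
    (∀ j, 0 < j → j < b.length → i ≤ (j - 1) / 2 → j ≠ p → (j - 1) / 2 ≠ p →
      b.getD ((j - 1) / 2) 0 ≤ b.getD j 0) →
    (i < p → ∀ c, c < b.length → (c - 1) / 2 = p →
      b.getD ((p - 1) / 2) 0 ≤ b.getD c 0) →
    (pvSiftupLoop b p).1.length = b.length ∧
    pvDesc i (pvSiftupLoop b p).2 = true ∧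
    (pvSiftupLoop b p).2 < b.length ∧
    b.length ≤ 2 * (pvSiftupLoop b p).2 + 1 ∧
    (∀ x : Int, ((pvSiftupLoop b p).1.set (pvSiftupLoop b p).2 x).Perm (b.set p x)) ∧
    (∀ j, 0 < j → j < b.length → i ≤ (j - 1) / 2 → j ≠ (pvSiftupLoop b p).2 →
      (j - 1) / 2 ≠ (pvSiftupLoop b p).2 →
      (pvSiftupLoop b p).1.getD ((j - 1) / 2) 0 ≤ (pvSiftupLoop b p).1.getD j 0) := by
  induction b, p using pvSiftupLoop.induct with
  | case1 b p hlt ih =>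
    intro hdesc hp hB hC
    obtain ⟨hc1, hc2, hc3, hmin⟩ := pv_child_spec b p hlt
    have hip : i ≤ p := pvDesc_le hdesc
    have hlen : (b.set p (b.getD (pvChild b p) 0)).length = b.length := by simp
    have hdesc' : pvDesc i (pvChild b p) = true := by
      rw [pvDesc]
      simp only [show i < pvChild b p by omega, if_pos, hc3]
      exact hdesc
    have hB' : ∀ j, 0 < j → j < (b.set p (b.getD (pvChild b p) 0)).length →
        i ≤ (j - 1) / 2 → j ≠ pvChild b p → (j - 1) / 2 ≠ pvChild b p →
        (b.set p (b.getD (pvChild b p) 0)).getD ((j - 1) / 2) 0 ≤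
          (b.set p (b.getD (pvChild b p) 0)).getD j 0 := by
      intro j hj0 hjl hji hjc hjpc
      rw [hlen] at hjl
      by_cases hjp : j = p
      · rw [hjp, pv_gset_ne _ _ (by omega), pv_gset_self _ _ hp]
        rw [hjp] at hji
        exact hC (by omega) (pvChild b p) hc2 hc3
      · by_cases hpj : (j - 1) / 2 = p
        · rw [hpj, pv_gset_self _ _ hp, pv_gset_ne _ _ (by omega)]
          exact hmin j hjp hpj hjl
        · rw [pv_gset_ne _ _ (by omega), pv_gset_ne _ _ (by omega)]
          exact hB j hj0 hjl hji hjp hpj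
    have hC' : i < pvChild b p → ∀ d, d < (b.set p (b.getD (pvChild b p) 0)).length →
        (d - 1) / 2 = pvChild b p →
        (b.set p (b.getD (pvChild b p) 0)).getD ((pvChild b p - 1) / 2) 0 ≤
          (b.set p (b.getD (pvChild b p) 0)).getD d 0 := by
      intro _ d hdl hdc
      rw [hlen] at hdl
      rw [hc3, pv_gset_self _ _ hp, pv_gset_ne _ _ (by omega)]
      have := hB d (by omega) hdl (by omega) (by omega) (by omega)
      rwa [hdc] at this
    have hrec := ih hdesc' (by rw [hlen]; exact hc2) hB' hC'
    rw [pvSiftupLoop, dif_pos hlt]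
    obtain ⟨r1, r2, r3, r4, r5, r6⟩ := hrec
    rw [hlen] at r1 r3 r4
    refine ⟨r1, r2, r3, r4, ?_, ?_⟩
    · intro x
      exact (r5 x).trans (pv_swap_perm b p (pvChild b p) x hp hc2 (by omega))
    · intro j hj0 hjl hji hjc hjpc
      exact r6 j hj0 (by rw [hlen]; exact hjl) hji hjc hjpc
  | case2 b p hnlt =>
    intro hdesc hp hB _
    rw [pvSiftupLoop, dif_neg hnlt]
    exact ⟨rfl, hdesc, hp, by omega, fun x => List.Perm.refl _, hB⟩

theorem pv_set_getD_self (a : List Int) (i : Nat) (hi : i < a.length) :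
    a.set i (a.getD i 0) = a := by
  apply List.ext_getElem?
  intro j
  rw [List.getElem?_set]
  by_cases h1 : i = j
  · subst h1
    simp [hi]
  · simp [h1]

theorem pv_siftup_spec (a : List Int) (i : Nat) (hi : i < a.length)
    (h : IsHeapFrom a (i + 1)) :
    IsHeapFrom (pvSiftup a i) i ∧ (pvSiftup a i).Perm a := by
  obtain ⟨r1, r2, r3, r4, r5, r6⟩ := pv_siftupLoop_spec i a i (pvDesc_self i) hi
    (fun j hj0 hjl hji hjne hjpne => h j hj0 hjl (by omega))
    (fun hii => absurd hii (lt_irrefl i))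
  simp only [pvSiftup]
  constructor
  · apply pv_siftdown_heap i (a.getD i 0) (pvSiftupLoop a i).2 (pvSiftupLoop a i).1 r2
      (by rw [r1]; exact r3)
    · intro j hj0 hjl hji hjne
      rw [r1] at hjl
      by_cases hpj : (j - 1) / 2 = (pvSiftupLoop a i).2
      · omega
      · rw [pv_gset_ne _ _ (by omega), pv_gset_ne _ _ (by omega)]
        exact r6 j hj0 hjl hji hjne hpj
    · intro _ c hcl hcp
      rw [r1] at hcl
      omega
  · have hperm := pv_siftdown_perm (pvSiftupLoop a i).2 (pvSiftupLoop a i).1 i (a.getD i 0)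
      (by rw [r1]; exact r3)
    have hres := hperm.trans (r5 (a.getD i 0))
    rwa [pv_set_getD_self a i hi] at hres

theorem pv_heapify_aux : ∀ (k : Nat) (b : List Int), k ≤ b.length → IsHeapFrom b k →
    IsHeapFrom (((List.range k).reverse).foldl (fun a i => pvSiftup a i) b) 0 ∧
    ((((List.range k).reverse).foldl (fun a i => pvSiftup a i) b)).Perm b := by
  intro k
  induction k with
  | zero => intro b _ hb; exact ⟨hb, List.Perm.refl b⟩
  | succ k ih =>
    intro b hk hb
    rw [List.range_succ, List.reverse_append, List.reverse_singleton, List.singleton_append,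
      List.foldl_cons]
    obtain ⟨h1, h2⟩ := pv_siftup_spec b k (by omega) hb
    obtain ⟨h3, h4⟩ := ih (pvSiftup b k) (by rw [h2.length_eq]; omega) h1
    exact ⟨h3, h4.trans h2⟩

theorem pv_heapify_spec (a : List Int) :
    IsHeapFrom (pvHeapify a) 0 ∧ (pvHeapify a).Perm a := by
  unfold pvHeapify
  apply pv_heapify_aux (a.length / 2) a (by omega)
  intro j hj0 hjl hjs
  omega

theorem pv_heap_min (h : List Int) (hh : IsHeapFrom h 0) :
    ∀ j, j < h.length → h.getD 0 0 ≤ h.getD j 0 := by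
  intro j
  induction j using Nat.strong_induction_on with
  | _ j ih =>
    intro hj
    rcases Nat.eq_zero_or_pos j with rfl | hj0
    · exact le_refl _
    · have h1 := hh j hj0 hj (by omega)
      have h2 := ih ((j - 1) / 2) (by omega) (by omega)
      omega

theorem pv_pyGet0_pos (l : List Int) (h0 : 0 < l.length) :
    PySem.List.pyGet? l 0 = some (l.getD 0 0) := by
  have h := PySem.List.pyGet?_natCast (xs := l) (n := 0)
  simp only [Nat.cast_zero] at h
  rw [h, List.getElem?_eq_getElem h0, List.getD_eq_getElem l 0 h0]

theorem pv_min_eq (l xs : List Int) (hperm : l.Perm xs) (hh : IsHeapFrom l 0) (m : Int)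
    (hm : PySem.List.min? xs (fun x => x) = some m) : l.getD 0 0 = m := by
  have hmem := PySem.List.min?_mem hm
  have hmin := PySem.List.min?_isMin hm
  have h0 : 0 < l.length := by
    rw [hperm.length_eq]
    cases xs
    · simp at hmem
    · simp
  have hin : l.getD 0 0 ∈ l := by
    rw [List.getD_eq_getElem l 0 h0]; exact List.getElem_mem h0
  have h1 : m ≤ l.getD 0 0 := hmin _ (hperm.mem_iff.mp hin)
  obtain ⟨j, hj, hje⟩ := List.getElem_of_mem (hperm.mem_iff.mpr hmem)
  have h2 : l.getD 0 0 ≤ m := by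
    have h3 := pv_heap_min l hh j hj
    rw [List.getD_eq_getElem l 0 hj, hje] at h3
    exact h3
  omega

theorem pv_go_eq (qs : List (List String)) (heap xs : List Int) (res : List String)
    (needH : Bool) (hperm : heap.Perm xs) (hheap : needH = false → IsHeapFrom heap 0) :
    qheap1Go qs heap res needH = qheap1AltGo qs xs res := by
  induction qs generalizing heap xs res needH with
  | nil => rfl
  | cons q rest ih =>
    simp only [qheap1Go, qheap1AltGo]
    cases PySem.List.pyGet? q 0 with
    | none => rfl
    | some c =>
      dsimp only
      by_cases hc1 : c = "1"
      · rw [if_pos hc1, if_pos hc1]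
        cases PySem.List.pyGet? q 1 with
        | none => rfl
        | some s =>
          dsimp only
          cases PySem.Int.ofStr? s with
          | none => rfl
          | some v =>
            dsimp only
            exact ih _ _ _ _ ((pv_push_perm heap v).trans (hperm.append_right [v]))
              (fun hf => pv_push_heap heap v (hheap hf))
      · rw [if_neg hc1, if_neg hc1]
        by_cases hc2 : c = "2"
        · rw [if_pos hc2, if_pos hc2]
          cases PySem.List.pyGet? q 1 with
          | none => rfl
          | some s =>
            dsimp only
            cases PySem.Int.ofStr? s with
            | none => rfl
            | some v =>
              dsimp only
              by_cases hv : v ∈ heap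
              · rw [PySem.List.remove?_eq_some_erase heap v hv,
                    PySem.List.remove?_eq_some_erase xs v (hperm.mem_iff.mp hv)]
                exact ih _ _ _ _ (hperm.erase v) (fun hf => nomatch hf)
              · rw [(PySem.List.remove?_eq_none_iff heap v).mpr hv,
                    (PySem.List.remove?_eq_none_iff xs v).mpr
                      (fun hm => hv (hperm.mem_iff.mpr hm))]
        · rw [if_neg hc2, if_neg hc2]
          by_cases hc3 : c = "3"
          · rw [if_pos hc3, if_pos hc3]
            have hH : IsHeapFrom (if needH then pvHeapify heap else heap) 0 := by
              cases needH
              · simpa using hheap rfl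
              · simpa using (pv_heapify_spec heap).1
            have hP : (if needH then pvHeapify heap else heap).Perm xs := by
              cases needH
              · simpa using hperm
              · simpa using (pv_heapify_spec heap).2.trans hperm
            cases hx : PySem.List.min? xs (fun x => x) with
            | none =>
              have hxnil : xs = [] := (PySem.List.min?_eq_none_iff xs (fun x => x)).mp hx
              have hlnil : (if needH then pvHeapify heap else heap) = [] := by
                have hle := hP.length_eq
                rw [hxnil] at hle
                exact List.length_eq_zero_iff.mp (by simpa using hle)
              rw [hlnil]
              rfl
            | some m =>
              have hne : xs ≠ [] := by
                intro h
                rw [(PySem.List.min?_eq_none_iff xs (fun x => x)).mpr h] at hx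
                exact nomatch hx
              have h0 : 0 < (if needH then pvHeapify heap else heap).length := by
                rw [hP.length_eq]
                cases xs
                · exact absurd rfl hne
                · simp
              rw [pv_pyGet0_pos _ h0, pv_min_eq _ xs hP hH m hx]
              dsimp only
              exact ih _ _ _ _ hP (fun _ => hH)
          · rw [if_neg hc3, if_neg hc3]
            exact ih _ _ _ _ hperm hheap

-- ===== VERDICT (by name: the statement is the Claim_ definition above) =====
theorem qheap1_spec : Claim_equal_qheap1 := by
  intro qs _ _
  unfold Spec_qheap1 qheap1 qheap1_alt
  rw [pv_go_eq qs [] [] [] false (List.Perm.refl _) (fun _ => by intro j hj hl _; simp at hl)]
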